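-- pv_equiv track=rewrite | github.com/mliezun/aoc | 2023/day-12/solve.py | possible_arrangements
-- ===== SOURCE A (Python) =====
-- def possible_arrangements(spring_line: str):
--     if not spring_line:
--         yield ""
--         return
--     if spring_line[0] == "?":
--         for a in possible_arrangements(spring_line[1:]):
--             yield "." + a
--             yield "#" + a
--     else:
--         for a in possible_arrangements(spring_line[1:]):
--             yield spring_line[0] + a
-- ===== SOURCE B (Python) =====
-- def possible_arrangements(spring_line: str):
--     # Counting loop: enumerate n in [0, 2**k) and fill the j-th '?' from bit j of n.
--     k = spring_line.count("?")
--     for n in range(2 ** k):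
--         yield _fill(spring_line, n)
--
--
-- def _fill(s, m):
--     if not s:
--         return ""
--     if s[0] == "?":
--         return ("#" if m & 1 else ".") + _fill(s[1:], m >> 1)
--     return s[0] + _fill(s[1:], m)
-- ===== Notes on version B (the rewrite author's own statement) =====
-- stated objective: alternative
-- what changed: Replaces A's branching recursive generator (which rebuilds every suffix arrangement via string concatenation at each level) by a flat counting loop: n runs over range(2**k) where k is the number of question marks, and the j-th question mark (left to right) is filled from bit j of n.
import Mathlib
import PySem

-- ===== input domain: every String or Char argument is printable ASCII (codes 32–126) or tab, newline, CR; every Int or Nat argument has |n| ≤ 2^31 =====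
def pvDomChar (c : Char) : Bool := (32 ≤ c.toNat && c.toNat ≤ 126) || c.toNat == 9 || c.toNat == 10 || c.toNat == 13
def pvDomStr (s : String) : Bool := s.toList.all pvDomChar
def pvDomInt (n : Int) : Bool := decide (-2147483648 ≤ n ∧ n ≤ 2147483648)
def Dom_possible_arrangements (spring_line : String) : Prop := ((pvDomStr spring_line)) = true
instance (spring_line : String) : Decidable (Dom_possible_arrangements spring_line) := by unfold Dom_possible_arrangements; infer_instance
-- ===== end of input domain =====

-- B replaces A's branching recursive generator by a counting loop over range(2**k),
-- filling the j-th '?' from bit j of n (objective: alternative decomposition, same cost).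

-- ===== PORT A =====
-- A's recursive generator, over List Char; yields in exactly A's order.
def pvArrA : List Char → List (List Char)
  | [] => [[]]
  | c :: rest =>
    if c = '?' then
      (pvArrA rest).flatMap (fun a => ['.' :: a, '#' :: a])
    else
      (pvArrA rest).map (fun a => c :: a)

def possible_arrangements (spring_line : String) : List String :=
  (pvArrA spring_line.toList).map String.mk

-- ===== PORT B =====
-- _fill(s, m): fill each '?' from the low bit of m, shifting m right at each '?'.
def pvFill : List Char → Nat → List Char
  | [], _ => []
  | c :: rest, m =>
    if c = '?' then
      (if m % 2 = 1 then '#' else '.') :: pvFill rest (m / 2)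
    else
      c :: pvFill rest m

-- range(2**k) has only nonnegative members, so List.range is exact here.
def possible_arrangements_alt (spring_line : String) : List String :=
  (List.range (2 ^ spring_line.toList.count '?')).map
    (fun n => String.mk (pvFill spring_line.toList n))

-- ===== PRECONDITION & SPEC =====
def Spec_possible_arrangements (spring_line : String) (out : List String) : Prop := out = possible_arrangements_alt spring_line
instance (spring_line : String) (out : List String) : Decidable (Spec_possible_arrangements spring_line out) := by unfold Spec_possible_arrangements; infer_instance

-- ===== CLAIM (what is proved, stated in full; the proofs are below) =====
def Claim_equal_possible_arrangements : Prop := ∀ (spring_line : String), Dom_possible_arrangements spring_line → Spec_possible_arrangements spring_line (possible_arrangements spring_line)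

-- ===== LEMMAS AND PROOFS =====

theorem map_range_double {α : Type} (f : Nat → α) (m : Nat) :
    (List.range (2 * m)).map f
      = (List.range m).flatMap (fun i => [f (2 * i), f (2 * i + 1)]) := by
  induction m with
  | zero => simp
  | succ m ih =>
    have h : 2 * (m + 1) = (2 * m + 1) + 1 := by ring
    rw [h, List.range_succ, List.range_succ, List.range_succ]
    simp [ih]

theorem pvArrA_eq (cs : List Char) :
    pvArrA cs = (List.range (2 ^ cs.count '?')).map (pvFill cs) := by
  induction cs with
  | nil => simp [pvArrA, pvFill]
  | cons c rest ih =>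
    by_cases hc : c = '?'
    · subst hc
      have hcount : (('?' : Char) :: rest).count '?' = rest.count '?' + 1 := by
        simp
      rw [pvArrA, if_pos rfl, ih, hcount, pow_succ, mul_comm,
        map_range_double (pvFill ('?' :: rest))]
      rw [List.flatMap_map]
      apply List.flatMap_congr
      intro i _
      have h1 : pvFill ('?' :: rest) (2 * i) = '.' :: pvFill rest i := by
        simp [pvFill, Nat.mul_mod_right]
      have h2 : pvFill ('?' :: rest) (2 * i + 1) = '#' :: pvFill rest i := by
        have hm : (2 * i + 1) % 2 = 1 := by omega
        have hd : (2 * i + 1) / 2 = i := by omega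
        simp [pvFill, hm, hd]
      simp [h1, h2]
    · have hcount : ((c :: rest).count '?') = rest.count '?' := by
        simp [hc]
      rw [pvArrA, if_neg hc, ih, hcount, List.map_map]
      apply List.map_congr_left
      intro i _
      simp [pvFill, hc]

-- ===== VERDICT (by name: the statement is the Claim_ definition above) =====
theorem possible_arrangements_spec : Claim_equal_possible_arrangements := by
  intro s _
  unfold Spec_possible_arrangements possible_arrangements possible_arrangements_alt
  rw [pvArrA_eq, List.map_map]
  rfl
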